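-- pv_equiv track=rewrite | github.com/luzalbaposse/TD-1-IntroduccionALaProgramacion | Material/clases-practicas/P15-recursion/recursion-solucion.py | sumar_n2
-- ===== SOURCE A (Python) =====
-- from typing import List
--
-- def sumar_n2(l:List[int], n:int) -> List[int]:
--     '''
--     Requiere: nada
--     Devuelve: Sea L el valor de l modificada, len(L)==len(l), y en toda posición
--           j entre 0 y len(l)-1:  L[j]==l[j] + n
--     '''
--     if len(l)==0: #CASO BASE
--         vr:List[int] = []
--         return vr
--
--     else: #PASO RECURSIVO
--         vr:List[int] = sumar_n2(l[:len(l)-1], n)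
--         vr.append(l[len(l)-1] + n)
--         return vr
-- ===== SOURCE B (Python) =====
-- from typing import List
--
-- def sumar_n2(l: List[int], n: int) -> List[int]:
--     vr: List[int] = []
--     for x in l:
--         vr.append(x + n)
--     return vr
-- ===== Notes on version B (the rewrite author's own statement) =====
-- stated objective: faster
-- what changed: Replaces A's recursion (peel the last element via an O(n) slice copy at each level, rebuild on return) with a single forward loop appending x+n into a fresh accumulator list.
import Mathlib
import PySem

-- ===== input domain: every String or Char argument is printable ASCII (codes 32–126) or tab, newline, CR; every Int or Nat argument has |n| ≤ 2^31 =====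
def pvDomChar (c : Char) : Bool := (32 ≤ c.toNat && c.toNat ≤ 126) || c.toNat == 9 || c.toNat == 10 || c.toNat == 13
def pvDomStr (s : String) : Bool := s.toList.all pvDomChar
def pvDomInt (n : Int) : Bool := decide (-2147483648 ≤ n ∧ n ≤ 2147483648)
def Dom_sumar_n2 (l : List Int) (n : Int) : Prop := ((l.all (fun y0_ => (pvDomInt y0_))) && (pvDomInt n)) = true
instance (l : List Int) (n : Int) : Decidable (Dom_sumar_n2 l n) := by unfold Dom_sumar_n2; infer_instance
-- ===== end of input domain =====

-- B replaces A's last-element recursion with one forward loop accumulating x+n; return value equivalence.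

-- ===== PORT A =====
-- recursion on the length: l[:len(l)-1] = PySem.List.slice l 0 (len-1), l[len(l)-1] is the last element
def sumar_n2 (l : List Int) (n : Int) : List Int :=
  if l.length = 0 then []
  else
    sumar_n2 (PySem.List.slice l none (some ((l.length : Int) - 1))) n ++ [((PySem.List.pyGet? l ((l.length : Int) - 1)).getD 0) + n]
termination_by l.length
decreasing_by
  rename_i h
  have hlen : 0 < l.length := by omega
  have : ((l.length : Int) - 1) = ((l.length - 1 : Nat) : Int) := by omega
  rw [this, PySem.List.slice_to_natCast]
  simp
  omega

-- ===== PORT B =====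
def sumar_n2_alt (l : List Int) (n : Int) : List Int :=
  l.foldl (fun vr x => vr ++ [x + n]) []

-- ===== PRECONDITION & SPEC =====
def Spec_sumar_n2 (l : List Int) (n : Int) (out : List Int) : Prop := out = sumar_n2_alt l n
instance (l : List Int) (n : Int) (out : List Int) : Decidable (Spec_sumar_n2 l n out) := by unfold Spec_sumar_n2; infer_instance

-- ===== CLAIM (what is proved, stated in full; the proofs are below) =====
def Claim_equal_sumar_n2 : Prop := ∀ (l : List Int) (n : Int), Dom_sumar_n2 l n → Spec_sumar_n2 l n (sumar_n2 l n)

-- ===== LEMMAS AND PROOFS =====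
theorem sumar_n2_alt_eq_map (l : List Int) (n : Int) : sumar_n2_alt l n = l.map (· + n) := by
  unfold sumar_n2_alt
  suffices h : ∀ acc : List Int, l.foldl (fun vr x => vr ++ [x + n]) acc = acc ++ l.map (· + n) by
    simpa using h []
  induction l with
  | nil => simp
  | cons a t ih => intro acc; simp [List.foldl, ih]

theorem sumar_n2_eq_map (l : List Int) (n : Int) : sumar_n2 l n = l.map (· + n) := by
  induction l using List.reverseRecOn with
  | nil => simp [sumar_n2]
  | append_singleton t a ih =>
    rw [sumar_n2]
    have hne : (t ++ [a]).length ≠ 0 := by simp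
    simp only [if_neg hne]
    have hlen : ((t ++ [a]).length : Int) - 1 = (t.length : Int) := by simp
    have hslice : PySem.List.slice (t ++ [a]) none (some ((t ++ [a]).length - 1 : Int)) = t := by
      rw [hlen, PySem.List.slice_to_natCast]
      simp
    have hget : (PySem.List.pyGet? (t ++ [a]) ((t ++ [a]).length - 1 : Int)).getD 0 = a := by
      rw [hlen]
      rw [PySem.List.pyGet?_natCast]
      simp
    rw [hslice, hget, ih]
    simp

-- ===== VERDICT (by name: the statement is the Claim_ definition above) =====
theorem sumar_n2_spec : Claim_equal_sumar_n2 := by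
  intro l n _
  unfold Spec_sumar_n2
  rw [sumar_n2_eq_map, sumar_n2_alt_eq_map]
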